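-- pv_equiv track=rewrite | github.com/mandrei09/FMI-Materiale | Anul I/Semestrul I/Programarea algoritmilor/Examen/Subiect test de laborator/Test/141_Mihai_Andrei_Alexandru_2.py | bordare
-- ===== SOURCE A (Python) =====
-- def bordare(matrice):
--
--     #bordare ultima coloana
--     lungime=len(matrice)
--     for i in range(lungime):
--         suma=sum(matrice[i])
--         matrice[i].append(suma)
--
--     #bordare ultima linie
--     lungime=len(matrice)
--     ultima=[]
--     for i in range(lungime+1):
--         s=0
--         for j in range(lungime):
--             s+=matrice[j][i]
--         ultima.append(s)
--     matrice.append(ultima)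
--
--     return matrice
-- ===== SOURCE B (Python) =====
-- def bordare(matrice):
--     n = len(matrice)
--     coloane = [0] * (n + 1)
--     for row in matrice:
--         row.append(sum(row))
--         for k in range(n + 1):
--             coloane[k] += row[k]
--     matrice.append(coloane)
--     return matrice
-- ===== Notes on version B (the rewrite author's own statement) =====
-- stated objective: alternative
-- what changed: B replaces A's two passes (append row sums, then a column-major nested rescan of the matrix) with a single row-major pass that maintains a running column-sums accumulator, appended at the end.
import Mathlib
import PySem

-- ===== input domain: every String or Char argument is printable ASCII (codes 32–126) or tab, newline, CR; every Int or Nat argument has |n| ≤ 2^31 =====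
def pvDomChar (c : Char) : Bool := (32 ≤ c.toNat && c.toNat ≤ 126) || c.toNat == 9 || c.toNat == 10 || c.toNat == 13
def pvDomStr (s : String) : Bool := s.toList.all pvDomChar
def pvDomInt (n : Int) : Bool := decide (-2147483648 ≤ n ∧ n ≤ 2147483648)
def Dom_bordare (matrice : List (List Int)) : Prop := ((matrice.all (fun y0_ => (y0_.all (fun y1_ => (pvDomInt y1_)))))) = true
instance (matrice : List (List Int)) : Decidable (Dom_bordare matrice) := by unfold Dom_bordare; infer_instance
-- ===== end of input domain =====

-- B fuses A's separate column-summing second pass into the single row pass via a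
-- maintained column accumulator (objective: alternative decomposition, same cost).
-- Both A and B mutate `matrice` in place identically; the claim is about the return value.

-- ===== PORT A =====
-- Indices below are always ≥ 0; matrice[j][i] raises IndexError in Python exactly
-- when out of range, which Pre_bordare excludes, so `getD _ 0` is exact inside Pre_.
def bordare (matrice : List (List Int)) : List (List Int) :=
  let lungime := matrice.length
  -- first loop: matrice[i].append(sum(matrice[i])) for each row in order
  let m := matrice.map (fun r => r ++ [r.sum])
  -- second loop: ultima[i] = Σ_j matrice[j][i]
  let ultima := (List.range (lungime + 1)).map (fun i =>
    (List.range lungime).foldl (fun s j => s + ((m.getD j []).getD i 0)) 0)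
  m ++ [ultima]

-- ===== PORT B =====
-- single pass: per row append its sum, then add row[k] into the column accumulator;
-- row[k] raises IndexError in Python exactly outside Pre_, so `getD k 0` is exact inside Pre_.
def bordare_alt (matrice : List (List Int)) : List (List Int) :=
  let n := matrice.length
  let p := matrice.foldl
    (fun (acc : List (List Int) × List Int) r =>
      let r' := r ++ [r.sum]
      (acc.1 ++ [r'],
       (List.range (n + 1)).map (fun k => acc.2.getD k 0 + r'.getD k 0)))
    ([], List.replicate (n + 1) 0)
  p.1 ++ [p.2]

-- ===== PRECONDITION & SPEC =====
-- Pre_ excludes exactly the inputs where Python A raises IndexError: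
-- some row shorter than the number of rows (both A and B raise there).
def Pre_bordare (matrice : List (List Int)) : Prop :=
  ∀ r ∈ matrice, matrice.length ≤ r.length
instance (matrice : List (List Int)) : Decidable (Pre_bordare matrice) := by
  unfold Pre_bordare; infer_instance
def pvWitness_bordare : List (List Int) := [[1, 2], [3, 4]]

def Spec_bordare (matrice : List (List Int)) (out : List (List Int)) : Prop := out = bordare_alt matrice
instance (matrice : List (List Int)) (out : List (List Int)) : Decidable (Spec_bordare matrice out) := by unfold Spec_bordare; infer_instance

-- ===== CLAIM (what is proved, stated in full; the proofs are below) =====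
def Claim_equal_bordare : Prop := ∀ (matrice : List (List Int)), Dom_bordare matrice → Pre_bordare matrice → Spec_bordare matrice (bordare matrice)

-- ===== LEMMAS AND PROOFS =====

theorem getD_map_range {α : Type} [Inhabited α] (g : Nat → α) (d : α) {n k : Nat}
    (hk : k < n) : ((List.range n).map g).getD k d = g k := by
  have h1 : k < ((List.range n).map g).length := by simpa using hk
  rw [List.getD_eq_getElem _ _ h1]
  simp

theorem foldl_invariant (n : Nat) (g : Nat → Int) (a : List (List Int))
    (xs : List (List Int)) :
    xs.foldl
      (fun (acc : List (List Int) × List Int) r =>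
        let r' := r ++ [r.sum]
        (acc.1 ++ [r'],
         (List.range (n + 1)).map (fun k => acc.2.getD k 0 + r'.getD k 0)))
      (a, (List.range (n + 1)).map g)
    = (a ++ xs.map (fun r => r ++ [r.sum]),
       (List.range (n + 1)).map (fun k =>
         g k + (xs.map (fun r => (r ++ [r.sum]).getD k 0)).sum)) := by
  induction xs generalizing a g with
  | nil => simp
  | cons r t ih =>
    simp only [List.foldl_cons, List.map_cons, List.sum_cons]
    have hmap : (List.range (n + 1)).map
        (fun k => (((List.range (n + 1)).map g).getD k 0) + (r ++ [r.sum]).getD k 0)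
        = (List.range (n + 1)).map (fun k => g k + (r ++ [r.sum]).getD k 0) := by
      apply List.map_congr_left
      intro k hk
      rw [getD_map_range g 0 (List.mem_range.mp hk)]
    rw [hmap, ih (fun k => g k + (r ++ [r.sum]).getD k 0) (a ++ [r ++ [r.sum]])]
    simp [add_assoc]

theorem range_foldl_getD (L : List (List Int)) (i : Nat) :
    (List.range L.length).foldl (fun s j => s + ((L.getD j []).getD i 0)) 0
    = (L.map (fun r => r.getD i 0)).sum := by
  have h : ∀ (c : Int), (List.range L.length).foldl
      (fun s j => s + ((L.getD j []).getD i 0)) c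
      = c + (L.map (fun r => r.getD i 0)).sum := by
    induction L with
    | nil => intro c; simp
    | cons r t ih =>
      intro c
      rw [List.length_cons, List.range_succ_eq_map, List.foldl_cons]
      rw [List.foldl_map]
      simpa [add_assoc] using ih (c + r.getD i 0)
  simpa using h 0

theorem bordare_eq (matrice : List (List Int)) :
    bordare matrice = bordare_alt matrice := by
  unfold bordare bordare_alt
  simp only []
  have hrep : (List.replicate (matrice.length + 1) (0 : Int))
      = (List.range (matrice.length + 1)).map (fun _ => (0 : Int)) := by
    simp [List.map_const']
  rw [hrep, foldl_invariant matrice.length (fun _ => 0) []]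
  simp only [List.nil_append, zero_add]
  congr 1
  congr 1
  apply List.map_congr_left
  intro i _
  rw [show matrice.length = (matrice.map (fun r => r ++ [r.sum])).length by simp,
    range_foldl_getD]
  simp [List.map_map, Function.comp_def]

-- ===== VERDICT (by name: the statement is the Claim_ definition above) =====
theorem bordare_spec : Claim_equal_bordare := by
  intro matrice _ _
  exact bordare_eq matrice
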